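-- pv_equiv track=rewrite | github.com/sleepyshep/FineCops-Ref | CRS/evaluation_CRS_neg.py | save_scores_by_cate_and_pos_id
-- ===== SOURCE A (Python) =====
-- from collections import defaultdict
--
-- def save_scores_by_cate_and_pos_id(data, cate):
--     classified = defaultdict(dict)
--     for item in data:
--         pos_id = item['pos_id']
--         key = tuple((item[name] for name in cate))
--         classified[key].setdefault(pos_id, []).append(item['score'])
--     sorted_keys = sorted(classified.keys(), key=lambda x: tuple(x[i] for i in range(len(key))))
--     sorted_final_dict = {key: classified[key] for key in sorted_keys}
--     return sorted_final_dict
-- ===== SOURCE B (Python) =====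
-- def save_scores_by_cate_and_pos_id(data, cate):
--     keys = sorted({tuple(item[name] for name in cate) for item in data})
--     result = {}
--     for k in keys:
--         inner = {}
--         for item in data:
--             if tuple(item[name] for name in cate) == k:
--                 inner.setdefault(item['pos_id'], []).append(item['score'])
--         result[k] = inner
--     return result
-- ===== Notes on version B (the rewrite author's own statement) =====
-- stated objective: alternative
-- what changed: Replaces the single-pass defaultdict grouping followed by a separate key sort with: collect the distinct category tuples as a set, sort them, then build each group's pos_id->scores dict by a per-key scan of the data, inserting groups directly in sorted order.
import Mathlib
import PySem

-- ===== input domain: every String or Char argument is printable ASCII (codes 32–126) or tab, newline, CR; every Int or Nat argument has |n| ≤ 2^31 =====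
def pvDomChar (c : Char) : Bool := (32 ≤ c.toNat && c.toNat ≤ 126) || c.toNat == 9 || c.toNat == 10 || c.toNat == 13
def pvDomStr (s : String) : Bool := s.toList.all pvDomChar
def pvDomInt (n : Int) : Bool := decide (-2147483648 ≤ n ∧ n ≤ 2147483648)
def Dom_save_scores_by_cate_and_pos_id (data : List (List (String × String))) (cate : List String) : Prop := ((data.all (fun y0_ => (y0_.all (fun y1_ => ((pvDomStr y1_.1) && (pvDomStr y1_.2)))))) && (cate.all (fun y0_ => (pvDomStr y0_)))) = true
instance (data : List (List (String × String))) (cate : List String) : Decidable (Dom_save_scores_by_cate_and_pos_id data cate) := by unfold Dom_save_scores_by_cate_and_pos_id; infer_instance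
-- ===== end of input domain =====

-- B replaces A's single-pass defaultdict grouping + separate key sort by: sorted set of
-- category tuples, then one per-key scan of the data building each group's inner dict
-- (alternative decomposition, same return value).

-- item[name]: first-match lookup on the association list; exact whenever the key is
-- present, which Pre_ guarantees (Python raises KeyError otherwise).
def pvItemGet (item : List (String × String)) (k : String) : String :=
  match item.find? (fun p => p.1 == k) with
  | some p => p.2
  | none => ""

-- ===== PORT A =====
def save_scores_by_cate_and_pos_id (data : List (List (String × String))) (cate : List String) : List (List String × List (String × List String)) :=
  -- classified = defaultdict(dict); classified[key].setdefault(pos_id, []).append(item['score'])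
  let classified : PySem.Dict (List String) (PySem.Dict String (List String)) :=
    data.foldl (fun classified item =>
      classified.modify (cate.map (fun name => pvItemGet item name)) PySem.Dict.empty
        (fun inner => inner.modify (pvItemGet item "pos_id") [] (fun l => l ++ [pvItemGet item "score"])))
      PySem.Dict.empty
  -- sorted(classified.keys(), key=lambda x: tuple(x[i] for i in range(len(key)))):
  -- the leftover `key` has len(key) = len(cate) whenever the lambda is ever called
  -- (data nonempty), and every x[i] is then in range, so the .getD "" default is exact.
  let sorted_keys := PySem.List.sorted classified.keys
    (fun x => (List.range cate.length).map (fun i => ((PySem.List.pyGet? x (Int.ofNat i)).getD "")))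
  -- {key: classified[key] for key in sorted_keys}: the keys are distinct, so the
  -- resulting dict's items are exactly this map.
  sorted_keys.map (fun k => (k, (classified.getD k PySem.Dict.empty).items))

-- ===== PORT B =====
def save_scores_by_cate_and_pos_id_alt (data : List (List (String × String))) (cate : List String) : List (List String × List (String × List String)) :=
  -- keys = sorted({tuple(item[name] for name in cate) for item in data})
  let keys := PySem.List.sorted
    (PySem.Set.ofList (data.map (fun item => cate.map (fun name => pvItemGet item name))))
    (fun x => x)
  -- for k in keys: inner built from the items whose tuple equals k; result[k] = inner.
  -- result's keys are the distinct sorted keys, so its items are exactly this map.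
  keys.map (fun k =>
    (k, ((data.filter (fun item => cate.map (fun name => pvItemGet item name) == k)).foldl
          (fun inner item => inner.modify (pvItemGet item "pos_id") [] (fun l => l ++ [pvItemGet item "score"]))
          PySem.Dict.empty).items))

-- ===== PRECONDITION & SPEC =====
-- Pre_ excludes exactly the inputs where Python A raises KeyError: an item missing
-- 'pos_id', 'score' or one of the names in cate.
def Pre_save_scores_by_cate_and_pos_id (data : List (List (String × String))) (cate : List String) : Prop :=
  ∀ item ∈ data, (item.any (fun p => p.1 == "pos_id")) = true ∧
    (item.any (fun p => p.1 == "score")) = true ∧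
    ∀ name ∈ cate, (item.any (fun p => p.1 == name)) = true
instance (data : List (List (String × String))) (cate : List String) : Decidable (Pre_save_scores_by_cate_and_pos_id data cate) := by unfold Pre_save_scores_by_cate_and_pos_id; infer_instance

def pvWitness_save_scores_by_cate_and_pos_id : (List (List (String × String))) × List String :=
  ([[("pos_id", "a"), ("score", "1"), ("c", "x")],
    [("pos_id", "b"), ("score", "2"), ("c", "x")]], ["c"])

def Spec_save_scores_by_cate_and_pos_id (data : List (List (String × String))) (cate : List String) (out : List (List String × List (String × List String))) : Prop := out = save_scores_by_cate_and_pos_id_alt data cate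
instance (data : List (List (String × String))) (cate : List String) (out : List (List String × List (String × List String))) : Decidable (Spec_save_scores_by_cate_and_pos_id data cate out) := by unfold Spec_save_scores_by_cate_and_pos_id; infer_instance

-- ===== CLAIM (what is proved, stated in full; the proofs are below) =====
def Claim_equal_save_scores_by_cate_and_pos_id : Prop := ∀ (data : List (List (String × String))) (cate : List String), Dom_save_scores_by_cate_and_pos_id data cate → Pre_save_scores_by_cate_and_pos_id data cate → Spec_save_scores_by_cate_and_pos_id data cate (save_scores_by_cate_and_pos_id data cate)

-- ===== LEMMAS AND PROOFS =====

-- getD of a modify-fold is the fold over the items that hit that key.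
theorem pv_getD_foldl_modify_filter {κ ν β : Type} [BEq κ] [LawfulBEq κ] [DecidableEq κ]
    (l : List β) (key : β → κ) (d0 : ν) (g : β → ν → ν) (d : PySem.Dict κ ν) (k : κ) :
    (l.foldl (fun d x => d.modify (key x) d0 (g x)) d).getD k d0 =
      (l.filter (fun x => key x == k)).foldl (fun v x => g x v) (d.getD k d0) := by
  induction l generalizing d with
  | nil => rfl
  | cons x xs ih =>
    simp only [List.foldl_cons, List.filter_cons]
    rw [ih]
    by_cases h : key x = k
    · simp [h, PySem.Dict.getD_modify_self]
    · have : (key x == k) = false := by simp [h]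
      simp [this, PySem.Dict.getD_modify, Ne.symm h]

-- the truncating sort key of A is the identity on lists of the right length
theorem pv_trunc_key_id (x : List String) (n : Nat) (h : x.length = n) :
    (List.range n).map (fun i => ((PySem.List.pyGet? x (Int.ofNat i)).getD "")) = x := by
  subst h
  apply List.ext_getElem
  · simp
  · intro i h1 h2
    simp only [List.getElem_map, List.getElem_range]
    have hg : PySem.List.pyGet? x (Int.ofNat i) = some x[i] := by
      simp [PySem.List.pyGet?, PySem.List.pyIdx?, h2]
    rw [hg]
    rfl

-- proof-side names for the shared pieces of the two ports (defeq to the inlined lambdas)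
def pvKtup (cate : List String) (item : List (String × String)) : List String :=
  cate.map (fun name => pvItemGet item name)

def pvInner (item : List (String × String)) :
    PySem.Dict String (List String) → PySem.Dict String (List String) :=
  fun inner => inner.modify (pvItemGet item "pos_id") [] (fun l => l ++ [pvItemGet item "score"])

-- the core LT instance on List String (picked up by the ports) sorts exactly like the
-- Mathlib LinearOrder instance (which the PySem sorted-order lemmas are stated for)
theorem pv_sorted_lt_bridge {α : Type} (xs : List α) (key : α → List String) :
    @PySem.List.sorted α (List String) List.instLT (fun a b => a.decidableLT b) xs key false
    = @PySem.List.sorted α (List String) List.instLinearOrder.toLT LinearOrder.toDecidableLT xs key false := by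
  rw [@PySem.List.sorted_eq_foldl_insertBy α (List String) List.instLT (fun a b => a.decidableLT b) xs key]
  rw [@PySem.List.sorted_eq_foldl_insertBy α (List String) List.instLinearOrder.toLT LinearOrder.toDecidableLT xs key]
  congr 1
  funext acc x
  congr 1
  funext a b
  simp only [decide_eq_decide]

-- ===== VERDICT (by name: the statement is the Claim_ definition above) =====
theorem save_scores_by_cate_and_pos_id_spec : Claim_equal_save_scores_by_cate_and_pos_id := by
  intro data cate _ _
  unfold Spec_save_scores_by_cate_and_pos_id
  show (PySem.List.sorted
      (data.foldl (fun d item => d.modify (pvKtup cate item) PySem.Dict.empty (pvInner item))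
        (PySem.Dict.empty : PySem.Dict (List String) (PySem.Dict String (List String)))).keys
      (fun x => (List.range cate.length).map (fun i => (PySem.List.pyGet? x (Int.ofNat i)).getD ""))).map
      (fun k => (k, ((data.foldl (fun d item => d.modify (pvKtup cate item) PySem.Dict.empty (pvInner item))
        (PySem.Dict.empty : PySem.Dict (List String) (PySem.Dict String (List String)))).getD k PySem.Dict.empty).items))
    = (PySem.List.sorted (PySem.Set.ofList (data.map (pvKtup cate))) (fun x => x)).map
      (fun k => (k, ((data.filter (fun item => pvKtup cate item == k)).foldl
          (fun inner item => pvInner item inner) PySem.Dict.empty).items))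
  have hkeys : (data.foldl (fun d item => d.modify (pvKtup cate item) PySem.Dict.empty (pvInner item))
      (PySem.Dict.empty : PySem.Dict (List String) (PySem.Dict String (List String)))).keys
      = PySem.Set.ofList (data.map (pvKtup cate)) := by
    rw [PySem.Dict.keys_foldl_modify_key data (pvKtup cate) PySem.Dict.empty
      (fun _ item => pvInner item) PySem.Dict.empty]
    rw [show (PySem.Dict.empty : PySem.Dict (List String) (PySem.Dict String (List String))).keys
      = [] from rfl]
    exact PySem.Set.update_nil_left _
  rw [hkeys]
  rw [pv_sorted_lt_bridge, pv_sorted_lt_bridge]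
  have hlen : ∀ x ∈ PySem.Set.ofList (data.map (pvKtup cate)), x.length = cate.length := by
    intro x hx
    obtain ⟨item, _, rfl⟩ := List.mem_map.mp ((PySem.Set.mem_ofList _ x).mp hx)
    simp [pvKtup]
  have hsorted : @PySem.List.sorted (List String) (List String) List.instLinearOrder.toLT
      LinearOrder.toDecidableLT (PySem.Set.ofList (data.map (pvKtup cate)))
      (fun x => (List.range cate.length).map (fun i => (PySem.List.pyGet? x (Int.ofNat i)).getD "")) false
      = @PySem.List.sorted (List String) (List String) List.instLinearOrder.toLT
      LinearOrder.toDecidableLT (PySem.Set.ofList (data.map (pvKtup cate))) (fun x => x) false := by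
    apply PySem.List.sorted_eq_of_perm_of_pairwise_lt
    · exact @PySem.List.sorted_perm _ _ List.instLinearOrder.toLT LinearOrder.toDecidableLT _ _ _
    · have hp := PySem.List.sorted_ofList_pairwise_lt (data.map (pvKtup cate))
      refine hp.imp_of_mem ?_
      intro a b ha hb hab
      have ha' := (@PySem.List.sorted_perm _ _ List.instLinearOrder.toLT LinearOrder.toDecidableLT _ _ _).mem_iff.mp ha
      have hb' := (@PySem.List.sorted_perm _ _ List.instLinearOrder.toLT LinearOrder.toDecidableLT _ _ _).mem_iff.mp hb
      rw [pv_trunc_key_id a cate.length (hlen a ha'), pv_trunc_key_id b cate.length (hlen b hb')]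
      exact hab
  rw [hsorted]
  apply List.map_congr_left
  intro k _
  refine Prod.ext rfl ?_
  rw [pv_getD_foldl_modify_filter data (pvKtup cate) PySem.Dict.empty
    (fun item inner => pvInner item inner) PySem.Dict.empty k]
  rfl
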